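-- pv_equiv track=rewrite | github.com/allenhyp/LeetCodePractice | ByteDance_ClosestOccurance.py | closestOccurance
-- ===== SOURCE A (Python) =====
-- def closestOccurance(s, queries):
--     n = len(s)
--     last = {}                                               # Last occurance index of the character
--     closest = [-1] * n                                      # Closest occurance, updated in every iteration
--     for i, c in enumerate(s):                               # Time complexity: O(n), space complexity: O(n)
--         if c in last:
--             if closest[last[c]] == -1:
--                 closest[last[c]] = i
--             else:
--                 left = abs(closest[last[c]] - last[c])
--                 right = abs(last[c] - i)
--                 if left > right:
--                     closest[last[c]] = i
--             closest[i] = last[c]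
--         last[c] = i
--
--     ret = []
--     for q in queries:                                       # Time needed for every query: O(1)
--         if 0 <= q < n:
--             ret.append(closest[q])
--         else:
--             ret.append(-1)
--
--     return ret                                              # Total time complexity: O(n + queries)
-- ===== SOURCE B (Python) =====
-- def closestOccurance(s, queries):
--     n = len(s)
--     seen = {}
--     left = []
--     for i, c in enumerate(s):                   # previous same-char index (or -1)
--         left.append(seen.get(c, -1))
--         seen[c] = i
--     seen = {}
--     rev = []
--     for i in range(n - 1, -1, -1):              # next same-char index (or -1), scanned backward
--         c = s[i]
--         rev.append(seen.get(c, -1))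
--         seen[c] = i
--     right = rev[::-1]
--     closest = []
--     for i in range(n):                          # merge: nearer side, tie -> left
--         l, r = left[i], right[i]
--         if l == -1:
--             closest.append(r)
--         elif r == -1:
--             closest.append(l)
--         elif i - l <= r - i:
--             closest.append(l)
--         else:
--             closest.append(r)
--     return [closest[q] if 0 <= q < n else -1 for q in queries]
-- ===== Notes on version B (the rewrite author's own statement) =====
-- stated objective: simpler
-- what changed: Replaces A's single interleaved pass that retro-fixes the previous occurrence's entry inside the scan with two independent directional scans (previous-occurrence array forward, next-occurrence array backward) plus a straight merge choosing the nearer side with ties to the left.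
import Mathlib
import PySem

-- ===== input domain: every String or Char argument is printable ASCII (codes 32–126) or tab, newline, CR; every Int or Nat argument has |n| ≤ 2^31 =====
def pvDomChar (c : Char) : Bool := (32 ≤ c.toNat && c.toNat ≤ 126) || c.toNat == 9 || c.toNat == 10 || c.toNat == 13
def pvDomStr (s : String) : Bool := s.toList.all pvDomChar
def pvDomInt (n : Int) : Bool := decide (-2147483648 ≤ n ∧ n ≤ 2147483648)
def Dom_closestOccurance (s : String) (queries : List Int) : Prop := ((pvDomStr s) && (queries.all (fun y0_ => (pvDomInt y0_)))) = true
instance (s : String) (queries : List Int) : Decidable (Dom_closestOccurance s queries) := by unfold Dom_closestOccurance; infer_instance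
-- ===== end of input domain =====

-- B replaces A's interleaved single pass (which patches the previous occurrence's slot mid-scan)
-- by two directional scans (prev-array, next-array) plus a merge; objective: simpler decomposition.

-- ===== PORT A =====
def pvALoop : List Char → Nat → List Int → PySem.Dict Char Nat → List Int × PySem.Dict Char Nat
  | [], _, closest, last => (closest, last)
  | c :: rest, i, closest, last =>
      match PySem.Dict.get? last c with
      | some p =>
          let cv := closest.getD p (-1)
          let closest1 :=
            if cv = -1 then closest.set p (i : Int)
            else if (cv - (p : Int)).natAbs > ((p : Int) - (i : Int)).natAbs then
              closest.set p (i : Int)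
            else closest
          pvALoop rest (i + 1) (closest1.set i (p : Int)) (PySem.Dict.insert last c i)
      | none => pvALoop rest (i + 1) closest (PySem.Dict.insert last c i)

def closestOccurance (s : String) (queries : List Int) : List Int :=
  let cs := s.toList
  let n := cs.length
  let closest := (pvALoop cs 0 (List.replicate n (-1)) PySem.Dict.empty).1
  queries.map (fun q => if 0 ≤ q ∧ q < (n : Int) then closest.getD q.toNat (-1) else -1)

-- ===== PORT B =====
def pvBLeft : List Char → Nat → PySem.Dict Char Int → List Int
  | [], _, _ => []
  | c :: rest, i, seen =>
      PySem.Dict.getD seen c (-1) :: pvBLeft rest (i + 1) (PySem.Dict.insert seen c (i : Int))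

def pvBRightRev : List (Char × Nat) → PySem.Dict Char Int → List Int
  | [], _ => []
  | (c, i) :: rest, seen =>
      PySem.Dict.getD seen c (-1) :: pvBRightRev rest (PySem.Dict.insert seen c (i : Int))

def closestOccurance_alt (s : String) (queries : List Int) : List Int :=
  let cs := s.toList
  let n := cs.length
  let left := pvBLeft cs 0 PySem.Dict.empty
  let right := (pvBRightRev cs.zipIdx.reverse PySem.Dict.empty).reverse
  let closest := (List.range n).map (fun i =>
    let l := left.getD i (-1)
    let r := right.getD i (-1)
    if l = -1 then r else if r = -1 then l
    else if (i : Int) - l ≤ r - (i : Int) then l else r)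
  queries.map (fun q => if 0 ≤ q ∧ q < (n : Int) then closest.getD q.toNat (-1) else -1)

-- ===== PRECONDITION & SPEC =====
def Spec_closestOccurance (s : String) (queries : List Int) (out : List Int) : Prop := out = closestOccurance_alt s queries
instance (s : String) (queries : List Int) (out : List Int) : Decidable (Spec_closestOccurance s queries out) := by unfold Spec_closestOccurance; infer_instance

-- ===== CLAIM (what is proved, stated in full; the proofs are below) =====
def Claim_equal_closestOccurance : Prop := ∀ (s : String) (queries : List Int), Dom_closestOccurance s queries → Spec_closestOccurance s queries (closestOccurance s queries)

-- ===== LEMMAS AND PROOFS =====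

/-- character at index `j` (both programs only probe in-range indices). -/
def chAt (cs : List Char) (j : Nat) : Char := cs.getD j ' '

/-- `v` is the index of the previous occurrence of `chAt cs i` before `i` (or `-1`). -/
def IsPrev (cs : List Char) (i : Nat) (v : Int) : Prop :=
  (v = -1 ∧ ∀ j, j < i → chAt cs j ≠ chAt cs i) ∨
  (∃ p : Nat, v = (p : Int) ∧ p < i ∧ chAt cs p = chAt cs i ∧
    ∀ j, p < j → j < i → chAt cs j ≠ chAt cs i)

/-- `v` is the index of the next occurrence of `chAt cs i` in `(i, k)` (or `-1`). -/
def IsNextB (cs : List Char) (k i : Nat) (v : Int) : Prop :=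
  (v = -1 ∧ ∀ j, i < j → j < k → chAt cs j ≠ chAt cs i) ∨
  (∃ q : Nat, v = (q : Int) ∧ i < q ∧ q < k ∧ chAt cs q = chAt cs i ∧
    ∀ j, i < j → j < q → chAt cs j ≠ chAt cs i)

def combF (i : Nat) (l r : Int) : Int :=
  if l = -1 then r else if r = -1 then l
  else if (i : Int) - l ≤ r - (i : Int) then l else r

/-- invariant of A's `last` dict after scanning `k` characters. -/
def LastInvA (cs : List Char) (k : Nat) (last : PySem.Dict Char Nat) : Prop :=
  (∀ c p, PySem.Dict.get? last c = some p →
      p < k ∧ chAt cs p = c ∧ ∀ j, p < j → j < k → chAt cs j ≠ c) ∧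
  (∀ c, PySem.Dict.get? last c = none → ∀ j, j < k → chAt cs j ≠ c)

/-- invariant of B's forward `seen` dict after scanning `k` characters. -/
def SeenInvB (cs : List Char) (k : Nat) (seen : PySem.Dict Char Int) : Prop :=
  (∀ c v, PySem.Dict.get? seen c = some v →
      ∃ p : Nat, v = (p : Int) ∧ p < k ∧ chAt cs p = c ∧ ∀ j, p < j → j < k → chAt cs j ≠ c) ∧
  (∀ c, PySem.Dict.get? seen c = none → ∀ j, j < k → chAt cs j ≠ c)

/-- invariant of B's backward `seen` dict when still `k` characters remain in front. -/
def SeenInvR (cs : List Char) (k : Nat) (seen : PySem.Dict Char Int) : Prop :=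
  (∀ c v, PySem.Dict.get? seen c = some v →
      ∃ q : Nat, v = (q : Int) ∧ k ≤ q ∧ q < cs.length ∧ chAt cs q = c ∧
        ∀ j, k ≤ j → j < q → chAt cs j ≠ c) ∧
  (∀ c, PySem.Dict.get? seen c = none → ∀ j, k ≤ j → j < cs.length → chAt cs j ≠ c)

theorem IsPrev_unique (cs : List Char) (i : Nat) (v w : Int)
    (hv : IsPrev cs i v) (hw : IsPrev cs i w) : v = w := by
  rcases hv with ⟨hv1, hv2⟩ | ⟨p, hp1, hp2, hp3, hp4⟩ <;>
    rcases hw with ⟨hw1, hw2⟩ | ⟨q, hq1, hq2, hq3, hq4⟩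
  · omega
  · exact absurd hq3 (hv2 q hq2)
  · exact absurd hp3 (hw2 p hp2)
  · subst hp1 hq1
    rcases Nat.lt_trichotomy p q with h | h | h
    · exact absurd hq3 (hp4 q h hq2)
    · omega
    · exact absurd hp3 (hq4 p h hp2)

theorem IsNextB_unique (cs : List Char) (k i : Nat) (v w : Int)
    (hv : IsNextB cs k i v) (hw : IsNextB cs k i w) : v = w := by
  rcases hv with ⟨hv1, hv2⟩ | ⟨p, hp1, hp2, hp2', hp3, hp4⟩ <;>
    rcases hw with ⟨hw1, hw2⟩ | ⟨q, hq1, hq2, hq2', hq3, hq4⟩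
  · omega
  · exact absurd hq3 (hv2 q hq2 hq2')
  · exact absurd hp3 (hw2 p hp2 hp2')
  · subst hp1 hq1
    rcases Nat.lt_trichotomy p q with h | h | h
    · exact absurd hp3 (hq4 p hp2 h)
    · omega
    · exact absurd hq3 (hp4 q hq2 h)

theorem pv_getD_set (l : List Int) (i : Nat) (v d : Int) (j : Nat) (h : i < l.length) :
    (l.set i v).getD j d = if j = i then v else l.getD j d := by
  simp only [List.getD_eq_getElem?_getD, List.getElem?_set]
  split
  · rename_i he; simp [he.symm]
  · rename_i he; rw [if_neg (fun hh => he hh.symm)]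

theorem pv_drop_cons (cs rest' : List Char) (c : Char) (k : Nat) (h : cs.drop k = c :: rest') :
    k < cs.length ∧ chAt cs k = c ∧ cs.drop (k + 1) = rest' := by
  have hk : k < cs.length := by
    by_contra hk
    rw [List.drop_eq_nil_of_le (by omega)] at h; cases h
  have h0 : cs[k]? = some c := by
    have := List.getElem?_drop (xs := cs) (i := k) (j := 0)
    rw [h] at this; simpa using this.symm
  refine ⟨hk, ?_, ?_⟩
  · simp [chAt, List.getD_eq_getElem?_getD, h0]
  · have := List.tail_drop (l := cs) (i := k)
    rw [h] at this; simpa using this.symm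

/-- main invariant for A's loop. -/
theorem pvALoop_inv (cs : List Char) :
    ∀ (rest : List Char) (k : Nat) (closest : List Int) (last : PySem.Dict Char Nat),
    rest = cs.drop k → k ≤ cs.length →
    closest.length = cs.length →
    (∀ i, i < k → ∃ p r, IsPrev cs i p ∧ IsNextB cs k i r ∧ closest.getD i (-1) = combF i p r) →
    (∀ i, k ≤ i → i < cs.length → closest.getD i (-1) = -1) →
    LastInvA cs k last →
    ((pvALoop rest k closest last).1.length = cs.length ∧
     ∀ i, i < cs.length → ∃ p r, IsPrev cs i p ∧ IsNextB cs cs.length i r ∧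
       (pvALoop rest k closest last).1.getD i (-1) = combF i p r) := by
  intro rest
  induction rest with
  | nil =>
    intro k closest last hdrop hk hlen h2 h3 _
    have hkn : k = cs.length := by
      have := List.drop_eq_nil_iff.mp hdrop.symm
      omega
    subst hkn
    simp only [pvALoop]
    exact ⟨hlen, h2⟩
  | cons c rest' ih =>
    intro k closest last hdrop hk hlen h2 h3 hlast
    obtain ⟨hklt, hck, hdrop'⟩ := pv_drop_cons cs rest' c k hdrop.symm
    have hkl : k < closest.length := by omega
    have hlastins : LastInvA cs (k + 1) (PySem.Dict.insert last c k) := by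
      constructor
      · intro c' p hp
        rw [PySem.Dict.get?_insert] at hp
        by_cases hc : c' = c
        · subst hc; simp at hp; subst hp
          exact ⟨by omega, hck, by omega⟩
        · rw [if_neg hc] at hp
          obtain ⟨ha1, ha2, ha3⟩ := hlast.1 c' p hp
          refine ⟨by omega, ha2, fun j hj1 hj2 => ?_⟩
          rcases Nat.lt_or_ge j k with hj | hj
          · exact ha3 j hj1 hj
          · have : j = k := by omega
            subst this; rw [hck]; exact fun hh => hc hh.symm
      · intro c' hp
        rw [PySem.Dict.get?_insert] at hp
        by_cases hc : c' = c
        · simp [hc] at hp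
        · rw [if_neg hc] at hp
          intro j hj
          rcases Nat.lt_or_ge j k with hj' | hj'
          · exact hlast.2 c' hp j hj'
          · have : j = k := by omega
            subst this; rw [hck]; exact fun hh => hc hh.symm
    cases hg : PySem.Dict.get? last c with
    | none =>
      have hstep : pvALoop (c :: rest') k closest last =
          pvALoop rest' (k + 1) closest (PySem.Dict.insert last c k) := by
        simp [pvALoop, hg]
      rw [hstep]
      refine ih (k + 1) closest (PySem.Dict.insert last c k) hdrop'.symm (by omega) hlen ?_ ?_ hlastins
      · intro i hi
        rcases Nat.lt_or_ge i k with hik | hik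
        · obtain ⟨p, r, hp, hr, hv⟩ := h2 i hik
          have hic : chAt cs i ≠ c := hlast.2 c hg i hik
          refine ⟨p, r, hp, ?_, hv⟩
          rcases hr with ⟨hr1, hr2⟩ | ⟨q, hq1, hq2, hq3, hq4, hq5⟩
          · left
            refine ⟨hr1, fun j hj1 hj2 => ?_⟩
            rcases Nat.lt_or_ge j k with hj | hj
            · exact hr2 j hj1 hj
            · have : j = k := by omega
              subst this; rw [hck]; exact fun hh => hic hh.symm
          · right; exact ⟨q, hq1, hq2, by omega, hq4, hq5⟩
        · have : i = k := by omega
          subst this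
          refine ⟨-1, -1, ?_, ?_, ?_⟩
          · left
            refine ⟨rfl, fun j hj => ?_⟩
            rw [hck]; exact hlast.2 c hg j hj
          · left; exact ⟨rfl, fun j hj1 hj2 => absurd hj1 (by omega)⟩
          · rw [h3 i (le_refl i) hklt]; rfl
      · intro i hi1 hi2; exact h3 i (by omega) hi2
    | some p' =>
      obtain ⟨hp'k, hp'c, hnog⟩ := hlast.1 c p' hg
      obtain ⟨pp, r0, hpp, hr0, hval⟩ := h2 p' hp'k
      have hr0' : r0 = -1 := by
        rcases hr0 with ⟨h, _⟩ | ⟨q, hq1, hq2, hq3, hq4, _⟩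
        · exact h
        · exact absurd (hp'c ▸ hq4) (hnog q hq2 hq3)
      subst hr0'
      have hcf : ∀ pq : Int, combF p' pq (-1) = pq := by
        intro pq; unfold combF; split_ifs <;> omega
      have hvalp : closest.getD p' (-1) = pp := by rw [hval, hcf]
      have hstep : pvALoop (c :: rest') k closest last =
          pvALoop rest' (k + 1)
            ((if closest.getD p' (-1) = -1 then closest.set p' (k : Int)
              else if (closest.getD p' (-1) - (p' : Int)).natAbs > ((p' : Int) - (k : Int)).natAbs then
                closest.set p' (k : Int)
              else closest).set k (p' : Int))
            (PySem.Dict.insert last c k) := by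
        simp [pvALoop, hg]
      rw [hstep]
      set C1 := (if closest.getD p' (-1) = -1 then closest.set p' (k : Int)
          else if (closest.getD p' (-1) - (p' : Int)).natAbs > ((p' : Int) - (k : Int)).natAbs then
            closest.set p' (k : Int)
          else closest) with hC1def
      have hC1len : C1.length = closest.length := by
        rw [hC1def]; split_ifs <;> simp
      have hC1p : C1.getD p' (-1) = combF p' pp (k : Int) := by
        rw [hC1def]
        simp only [hvalp]
        rcases hpp with ⟨hpp1, _⟩ | ⟨pn, hpn1, hpn2, _, _⟩
        · rw [hpp1, if_pos rfl, pv_getD_set _ _ _ _ _ (by omega), if_pos rfl]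
          unfold combF; rw [if_pos rfl]
        · subst hpn1
          rw [if_neg (show ((pn : Nat) : Int) ≠ -1 by omega)]
          by_cases h1 : ((pn : Int) - (p' : Int)).natAbs > ((p' : Int) - (k : Int)).natAbs
          · rw [if_pos h1, pv_getD_set _ _ _ _ _ (by omega), if_pos rfl]
            unfold combF
            rw [if_neg (by omega), if_neg (by omega), if_neg (by omega)]
          · rw [if_neg h1, hvalp]
            unfold combF
            rw [if_neg (by omega), if_neg (by omega), if_pos (by omega)]
      have hC1o : ∀ j, j ≠ p' → C1.getD j (-1) = closest.getD j (-1) := by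
        intro j hj
        rw [hC1def]
        split_ifs
        · rw [pv_getD_set _ _ _ _ _ (by omega), if_neg hj]
        · rw [pv_getD_set _ _ _ _ _ (by omega), if_neg hj]
        · rfl
      have hkC1 : k < C1.length := by omega
      refine ih (k + 1) (C1.set k (p' : Int)) (PySem.Dict.insert last c k) hdrop'.symm
        (by omega) (by simp [hC1len, hlen]) ?_ ?_ hlastins
      · intro i hi
        by_cases hik : i = k
        · subst hik
          refine ⟨(p' : Int), -1, ?_, ?_, ?_⟩
          · right
            refine ⟨p', rfl, hp'k, by rw [hp'c, hck], fun j hj1 hj2 => ?_⟩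
            rw [hck]; exact hnog j hj1 hj2
          · left; exact ⟨rfl, fun j hj1 hj2 => absurd hj1 (by omega)⟩
          · rw [pv_getD_set _ _ _ _ _ hkC1, if_pos rfl]
            unfold combF
            rw [if_neg (by omega), if_pos rfl]
        · have hik' : i < k := by omega
          have hv2 : (C1.set k (p' : Int)).getD i (-1) = C1.getD i (-1) := by
            rw [pv_getD_set _ _ _ _ _ hkC1, if_neg hik]
          by_cases hip : i = p'
          · subst hip
            refine ⟨pp, (k : Int), hpp, ?_, ?_⟩
            · right
              refine ⟨k, rfl, hp'k, by omega, by rw [hck, hp'c], fun j hj1 hj2 => ?_⟩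
              rw [hp'c]; exact hnog j hj1 hj2
            · rw [hv2, hC1p]
          · obtain ⟨p, r, hpO, hrO, hvO⟩ := h2 i hik'
            refine ⟨p, r, hpO, ?_, by rw [hv2, hC1o i hip, hvO]⟩
            rcases hrO with ⟨hr1, hr2⟩ | ⟨q, hq1, hq2, hq3, hq4, hq5⟩
            · left
              refine ⟨hr1, fun j hj1 hj2 => ?_⟩
              rcases Nat.lt_or_ge j k with hj | hj
              · exact hr2 j hj1 hj
              · have hjk : j = k := by omega
                subst hjk
                rw [hck]; intro hh
                rcases Nat.lt_trichotomy i p' with h | h | h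
                · exact hr2 p' h hp'k (hp'c.trans hh)
                · exact hip h
                · exact hnog i h hik' hh.symm
            · right; exact ⟨q, hq1, hq2, by omega, hq4, hq5⟩
      · intro i hi1 hi2
        rw [pv_getD_set _ _ _ _ _ hkC1, if_neg (by omega), hC1o i (by omega)]
        exact h3 i (by omega) hi2

theorem pvBLeft_spec (cs : List Char) :
    ∀ (rest : List Char) (k : Nat) (seen : PySem.Dict Char Int),
    rest = cs.drop k → k ≤ cs.length → SeenInvB cs k seen →
    ((pvBLeft rest k seen).length = rest.length ∧
     ∀ m, m < rest.length → IsPrev cs (k + m) ((pvBLeft rest k seen).getD m (-1))) := by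
  intro rest
  induction rest with
  | nil => intro k seen _ _ _; exact ⟨rfl, by intro m hm; cases hm⟩
  | cons c rest' ih =>
    intro k seen hdrop hk hinv
    obtain ⟨hklt, hck, hdrop'⟩ := pv_drop_cons cs rest' c k hdrop.symm
    have hinv' : SeenInvB cs (k + 1) (PySem.Dict.insert seen c (k : Int)) := by
      constructor
      · intro c' v hv
        rw [PySem.Dict.get?_insert] at hv
        by_cases hc : c' = c
        · subst hc; simp at hv
          exact ⟨k, hv.symm, by omega, hck, by omega⟩
        · rw [if_neg hc] at hv
          obtain ⟨p, hp1, hp2, hp3, hp4⟩ := hinv.1 c' v hv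
          refine ⟨p, hp1, by omega, hp3, ?_⟩
          intro j hj1 hj2
          rcases Nat.lt_or_ge j k with hj | hj
          · exact hp4 j hj1 hj
          · have : j = k := by omega
            subst this; rw [hck]; exact fun hh => hc hh.symm
      · intro c' hv
        rw [PySem.Dict.get?_insert] at hv
        by_cases hc : c' = c
        · simp [hc] at hv
        · rw [if_neg hc] at hv
          intro j hj
          rcases Nat.lt_or_ge j k with hj' | hj'
          · exact hinv.2 c' hv j hj'
          · have : j = k := by omega
            subst this; rw [hck]; exact fun hh => hc hh.symm
    obtain ⟨ihlen, ihspec⟩ := ih (k + 1) (PySem.Dict.insert seen c (k : Int)) hdrop'.symm (by omega) hinv'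
    constructor
    · simp [pvBLeft, ihlen]
    · intro m hm
      match m with
      | 0 =>
        simp only [pvBLeft, List.getD_cons_zero, Nat.add_zero]
        rw [PySem.Dict.getD_eq_get?_getD]
        cases hg : PySem.Dict.get? seen c with
        | none =>
          left
          refine ⟨rfl, ?_⟩
          intro j hj; rw [hck]; exact hinv.2 c hg j hj
        | some v =>
          obtain ⟨p, hp1, hp2, hp3, hp4⟩ := hinv.1 c v hg
          right
          refine ⟨p, by simp [hp1], hp2, by rw [hck]; exact hp3, ?_⟩
          intro j hj1 hj2; rw [hck]; exact hp4 j hj1 hj2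
      | m' + 1 =>
        simp only [pvBLeft, List.getD_cons_succ]
        have := ihspec m' (by simpa using hm)
        have harr : k + (m' + 1) = (k + 1) + m' := by omega
        rw [harr]; exact this

theorem pvBRightRev_spec (cs : List Char) :
    ∀ (k : Nat), k ≤ cs.length → ∀ (seen : PySem.Dict Char Int), SeenInvR cs k seen →
    ((pvBRightRev ((cs.take k).zipIdx.reverse) seen).length = k ∧
     ∀ i, i < k →
       IsNextB cs cs.length i ((pvBRightRev ((cs.take k).zipIdx.reverse) seen).reverse.getD i (-1))) := by
  intro k
  induction k with
  | zero => intro _ seen _; exact ⟨rfl, by intro i hi; cases hi⟩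
  | succ k ih =>
    intro hk seen hinv
    have hklt : k < cs.length := by omega
    have hck : chAt cs k = cs[k] := by
      simp [chAt, List.getD_eq_getElem?_getD, List.getElem?_eq_getElem hklt]
    have heq : (cs.take (k + 1)).zipIdx.reverse = (cs[k], k) :: (cs.take k).zipIdx.reverse := by
      rw [List.take_add_one, List.getElem?_eq_getElem hklt, List.zipIdx_append]
      simp [Nat.min_eq_left (le_of_lt hklt)]
    have hinv' : SeenInvR cs k (PySem.Dict.insert seen cs[k] (k : Int)) := by
      constructor
      · intro c' v hv
        rw [PySem.Dict.get?_insert] at hv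
        by_cases hc : c' = cs[k]
        · subst hc; simp at hv
          exact ⟨k, hv.symm, le_refl k, hklt, hck, by omega⟩
        · rw [if_neg hc] at hv
          obtain ⟨q, hq1, hq2, hq3, hq4, hq5⟩ := hinv.1 c' v hv
          refine ⟨q, hq1, by omega, hq3, hq4, ?_⟩
          intro j hj1 hj2
          rcases Nat.lt_or_ge j (k + 1) with hj | hj
          · have : j = k := by omega
            subst this; rw [hck]; exact fun hh => hc hh.symm
          · exact hq5 j hj hj2
      · intro c' hv
        rw [PySem.Dict.get?_insert] at hv
        by_cases hc : c' = cs[k]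
        · simp [hc] at hv
        · rw [if_neg hc] at hv
          intro j hj1 hj2
          rcases Nat.lt_or_ge j (k + 1) with hj | hj
          · have : j = k := by omega
            subst this; rw [hck]; exact fun hh => hc hh.symm
          · exact hinv.2 c' hv j hj hj2
    obtain ⟨ihlen, ihspec⟩ := ih (by omega) (PySem.Dict.insert seen cs[k] (k : Int)) hinv'
    rw [heq]
    simp only [pvBRightRev]
    constructor
    · simp [ihlen]
    · intro i hi
      rw [List.reverse_cons]
      have hrl : (pvBRightRev ((cs.take k).zipIdx.reverse)
          (PySem.Dict.insert seen cs[k] (k : Int))).reverse.length = k := by simp [ihlen]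
      rcases Nat.lt_or_ge i k with hik | hik
      · rw [List.getD_append _ _ _ _ (by omega)]
        exact ihspec i hik
      · have hik' : i = k := by omega
        subst hik'
        rw [List.getD_append_right _ _ _ _ (by omega), hrl, Nat.sub_self]
        simp only [List.getD_cons_zero]
        rw [PySem.Dict.getD_eq_get?_getD]
        cases hg : PySem.Dict.get? seen cs[i] with
        | none =>
          left
          refine ⟨rfl, ?_⟩
          intro j hj1 hj2; rw [hck]; exact hinv.2 cs[i] hg j (by omega) hj2
        | some v =>
          obtain ⟨q, hq1, hq2, hq3, hq4, hq5⟩ := hinv.1 cs[i] v hg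
          right
          refine ⟨q, by simp [hq1], by omega, hq3, by rw [hck]; exact hq4, ?_⟩
          intro j hj1 hj2; rw [hck]; exact hq5 j (by omega) hj2

-- ===== VERDICT (by name: the statement is the Claim_ definition above) =====
theorem closestOccurance_spec : Claim_equal_closestOccurance := by
  intro s queries _
  show closestOccurance s queries = closestOccurance_alt s queries
  simp only [closestOccurance, closestOccurance_alt]
  have hA := pvALoop_inv s.toList s.toList 0 (List.replicate s.toList.length (-1))
    PySem.Dict.empty rfl (Nat.zero_le _) (by simp)
    (fun i hi => absurd hi (Nat.not_lt_zero i))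
    (fun i _ hi2 => by
      have : i < s.length := by simpa using hi2
      simp [List.getD_eq_getElem?_getD, this])
    ⟨fun c p hp => by simp [PySem.Dict.get?_empty] at hp,
     fun c _ j hj => absurd hj (Nat.not_lt_zero j)⟩
  have hB1 := pvBLeft_spec s.toList s.toList 0 PySem.Dict.empty rfl (Nat.zero_le _)
    ⟨fun c v hv => by simp [PySem.Dict.get?_empty] at hv,
     fun c _ j hj => absurd hj (Nat.not_lt_zero j)⟩
  have hB2 := pvBRightRev_spec s.toList s.toList.length (le_refl _) PySem.Dict.empty
    ⟨fun c v hv => by simp [PySem.Dict.get?_empty] at hv,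
     fun c _ j hj1 hj2 => absurd hj2 (by omega)⟩
  rw [List.take_length] at hB2
  have hlist : (pvALoop s.toList 0 (List.replicate s.toList.length (-1)) PySem.Dict.empty).1 =
      (List.range s.toList.length).map (fun i =>
        let l := (pvBLeft s.toList 0 PySem.Dict.empty).getD i (-1)
        let r := ((pvBRightRev s.toList.zipIdx.reverse PySem.Dict.empty).reverse).getD i (-1)
        if l = -1 then r else if r = -1 then l
        else if (i : Int) - l ≤ r - (i : Int) then l else r) := by
    apply List.ext_getElem
    · rw [hA.1]; simp
    · intro i h1 h2
      have hi : i < s.toList.length := by rw [hA.1] at h1; exact h1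
      obtain ⟨p, r, hp, hr, hv⟩ := hA.2 i hi
      have hL := hB1.2 i hi
      simp only [Nat.zero_add] at hL
      have hR := hB2.2 i hi
      have hpeq := IsPrev_unique s.toList i p _ hp hL
      have hreq := IsNextB_unique s.toList s.toList.length i r _ hr hR
      simp only [List.getElem_map, List.getElem_range]
      rw [← List.getD_eq_getElem _ (-1) h1, hv, hpeq, hreq]
      rfl
  rw [hlist]
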